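-- pv_equiv track=rewrite | github.com/andrewpickett/advent-of-code | 2015/python/day19/main.py | get_elems
-- ===== SOURCE A (Python) =====
-- def get_elems(molecule):
-- 	elems = []
-- 	curr_elem = ''
-- 	for i in range(len(molecule)):
-- 		if molecule[i] in 'ABCDEFGHIJKLMNOPQRSTUVWXYZ':
-- 			if curr_elem != '':
-- 				elems.append(curr_elem)
-- 			curr_elem = ''
-- 		curr_elem += molecule[i]
-- 	elems.append(curr_elem)
-- 	return elems
-- ===== SOURCE B (Python) =====
-- def get_elems(molecule):
--     uppers = 'ABCDEFGHIJKLMNOPQRSTUVWXYZ'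
--     bounds = [0] + [i for i in range(1, len(molecule)) if molecule[i] in uppers]
--     bounds.append(len(molecule))
--     return [molecule[a:b] for a, b in zip(bounds, bounds[1:])]
-- ===== Notes on version B (the rewrite author's own statement) =====
-- stated objective: faster
-- what changed: Replaces the char-by-char string accumulation with an index pass collecting token boundaries (position 0 plus each later uppercase position) followed by a slicing pass over consecutive boundary pairs.
import Mathlib
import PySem

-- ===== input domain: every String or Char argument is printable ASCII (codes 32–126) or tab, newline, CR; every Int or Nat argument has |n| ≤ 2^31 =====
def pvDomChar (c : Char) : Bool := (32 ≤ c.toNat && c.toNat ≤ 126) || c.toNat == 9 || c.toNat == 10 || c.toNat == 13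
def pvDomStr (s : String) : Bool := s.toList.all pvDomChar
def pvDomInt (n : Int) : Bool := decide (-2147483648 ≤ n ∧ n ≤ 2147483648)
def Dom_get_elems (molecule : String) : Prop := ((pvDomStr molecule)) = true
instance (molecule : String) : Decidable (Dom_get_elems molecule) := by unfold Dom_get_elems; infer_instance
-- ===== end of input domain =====

-- B replaces A's char-by-char accumulation by a boundary-index pass plus a slicing pass (alternative decomposition, same result).

-- membership test `c in 'ABCDEFGHIJKLMNOPQRSTUVWXYZ'` (single char against the literal)
def pvIsUp (c : Char) : Bool := ("ABCDEFGHIJKLMNOPQRSTUVWXYZ".toList).contains c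

-- ===== PORT A =====
-- curr_elem is carried as its list of characters (String.mk at emission); the loop over range(len)
-- reads molecule[i] sequentially, transliterated as a fold over the characters.
-- loop body: the `if molecule[i] in …` block, then `curr_elem += molecule[i]`
def pvStepA (st : List String × List Char) (c : Char) : List String × List Char :=
  let st := if pvIsUp c then ((if st.2 ≠ [] then st.1 ++ [String.mk st.2] else st.1), ([] : List Char)) else st
  (st.1, st.2 ++ [c])

def get_elems (molecule : String) : List String :=
  let st := molecule.toList.foldl pvStepA ([], [])
  st.1 ++ [String.mk st.2]

-- ===== PORT B =====
-- `molecule[a:b]` with 0 ≤ a ≤ b ≤ len is exactly take (b-a) (drop a) on the char list.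
def get_elems_alt (molecule : String) : List String :=
  let cs := molecule.toList
  let bounds := (0 :: (List.range' 1 (cs.length - 1)).filter (fun i => pvIsUp (cs.getD i ' '))) ++ [cs.length]
  (bounds.zip bounds.tail).map (fun p => String.mk ((cs.drop p.1).take (p.2 - p.1)))

-- ===== PRECONDITION & SPEC =====
def Spec_get_elems (molecule : String) (out : List String) : Prop := out = get_elems_alt molecule
instance (molecule : String) (out : List String) : Decidable (Spec_get_elems molecule out) := by unfold Spec_get_elems; infer_instance

-- ===== CLAIM (what is proved, stated in full; the proofs are below) =====
def Claim_equal_get_elems : Prop := ∀ (molecule : String), Dom_get_elems molecule → Spec_get_elems molecule (get_elems molecule)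

-- ===== LEMMAS AND PROOFS =====

-- common recursive characterization: left-to-right splitting with current token `curr`
def pvGo (curr : List Char) : List Char → List String
  | [] => [String.mk curr]
  | c :: rest =>
      if pvIsUp c then
        (if curr ≠ [] then [String.mk curr] else []) ++ pvGo [c] rest
      else pvGo (curr ++ [c]) rest

-- B's slicing pass over a boundary list
def pvSlices (cs : List Char) (l : List Nat) : List String :=
  (l.zip l.tail).map (fun p => String.mk ((cs.drop p.1).take (p.2 - p.1)))

theorem pvA_go (cs : List Char) : ∀ (elems : List String) (curr : List Char),
    (let st := cs.foldl pvStepA (elems, curr)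
     st.1 ++ [String.mk st.2]) = elems ++ pvGo curr cs := by
  induction cs with
  | nil => intro elems curr; simp [pvGo]
  | cons c rest ih =>
      intro elems curr
      rw [List.foldl_cons]
      by_cases h : pvIsUp c = true
      · by_cases hc : curr = []
        · subst hc
          have : pvStepA ([] ++ elems, []) c = (elems, [c]) := by simp [pvStepA, h]
          simp only [List.nil_append] at this
          rw [this, ih, pvGo, h]
          simp
        · have : pvStepA (elems, curr) c = (elems ++ [String.mk curr], [c]) := by
            simp [pvStepA, h, hc]
          rw [this, ih, pvGo, h]
          simp [hc]
      · simp only [Bool.not_eq_true] at h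
        have : pvStepA (elems, curr) c = (elems, curr ++ [c]) := by simp [pvStepA, h]
        rw [this, ih, pvGo, h]
        simp

theorem pvGo_nil_cons (c : Char) (rest : List Char) : pvGo [] (c :: rest) = pvGo [c] rest := by
  by_cases h : pvIsUp c = true <;> simp [pvGo, h]

theorem pvGo_noUp (rest : List Char) : ∀ curr, (∀ c ∈ rest, pvIsUp c = false) →
    pvGo curr rest = [String.mk (curr ++ rest)] := by
  induction rest with
  | nil => intro curr _; simp [pvGo]
  | cons c r ih =>
      intro curr h
      have hc : pvIsUp c = false := h c (by simp)
      simp [pvGo, hc, ih (curr ++ [c]) (fun x hx => h x (by simp [hx]))]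

theorem pvGo_seg (mid : List Char) : ∀ curr rest, (∀ c ∈ mid, pvIsUp c = false) →
    pvGo curr (mid ++ rest) = pvGo (curr ++ mid) rest := by
  induction mid with
  | nil => intro curr rest _; simp
  | cons c m ih =>
      intro curr rest h
      have hc : pvIsUp c = false := h c (by simp)
      simp [pvGo, hc, ih (curr ++ [c]) rest (fun x hx => h x (by simp [hx]))]

theorem pvSlices_shift (l : List Nat) (i : Nat) (cs : List Char) :
    pvSlices cs (l.map (fun j => j + i)) = pvSlices (cs.drop i) l := by
  unfold pvSlices
  rw [← List.map_tail, List.zip_map, List.map_map]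
  apply List.map_congr_left
  intro ⟨a, b⟩ _
  simp only [Function.comp, Prod.map]
  rw [List.drop_drop, Nat.add_comm a i]
  congr 2
  omega

-- splitting pvGo at the first interior uppercase position
theorem pvGo_split (cs : List Char) (i : Nat) (h1 : 1 ≤ i) (hin : i < cs.length)
    (hPi : pvIsUp (cs.getD i ' ') = true)
    (hmin : ∀ j, 1 ≤ j → j < i → pvIsUp (cs.getD j ' ') = false) :
    pvGo [] cs = String.mk (cs.take i) :: pvGo [] (cs.drop i) := by
  cases cs with
  | nil => simp at hin
  | cons c0 rest0 =>
      have hmid : ∀ x ∈ rest0.take (i - 1), pvIsUp x = false := by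
        intro x hx
        obtain ⟨j, hj, hxj⟩ := List.mem_iff_getElem.mp hx
        have hjlen : j < rest0.length := by simp at hj; omega
        have hji : j < i - 1 := by simp at hj; omega
        have hxj' : rest0[j] = x := by rw [← hxj, List.getElem_take]
        have := hmin (j + 1) (by omega) (by omega)
        have hget : (c0 :: rest0).getD (j + 1) ' ' = x := by
          rw [List.getD_eq_getElem?_getD, List.getElem?_cons_succ,
            List.getElem?_eq_getElem hjlen]
          simp [hxj']
        rwa [hget] at this
      obtain ⟨k, rfl⟩ : ∃ k, i = k + 1 := ⟨i - 1, by omega⟩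
      have hdec : rest0.take k ++ (c0 :: rest0).drop (k+1) = rest0 := by
        rw [List.drop_succ_cons, List.take_append_drop]
      have hk1 : k + 1 - 1 = k := by omega
      rw [hk1] at hmid
      cases hd : (c0 :: rest0).drop (k+1) with
      | nil => have := List.drop_eq_nil_iff.mp hd; simp at this hin; omega
      | cons ci tl =>
          have hci : pvIsUp ci = true := by
            have h0 : (c0 :: rest0)[k+1]? = some ci := by
              have h1' : (List.drop (k+1) (c0 :: rest0))[0]? = some ci := by rw [hd]; rfl
              rw [List.getElem?_drop] at h1'
              simpa using h1'
            rw [List.getD_eq_getElem?_getD, h0] at hPi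
            simpa using hPi
          have htake : (c0 :: rest0).take (k+1) = c0 :: rest0.take k := by
            rw [List.take_succ_cons]
          have hcalc : pvGo [] (c0 :: rest0)
              = String.mk ((c0 :: rest0).take (k+1)) :: pvGo [ci] tl :=
            calc pvGo [] (c0 :: rest0) = pvGo [c0] rest0 := pvGo_nil_cons ..
              _ = pvGo [c0] (rest0.take k ++ (c0 :: rest0).drop (k+1)) := by rw [hdec]
              _ = pvGo ([c0] ++ rest0.take k) ((c0 :: rest0).drop (k+1)) := pvGo_seg _ _ _ hmid
              _ = pvGo ((c0 :: rest0).take (k+1)) (ci :: tl) := by rw [htake, hd]; rfl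
              _ = String.mk ((c0 :: rest0).take (k+1)) :: pvGo [ci] tl := by
                    simp [pvGo, hci]
          conv_rhs => rw [pvGo_nil_cons]
          exact hcalc

theorem pvB_eq_go (n : Nat) : ∀ cs : List Char, cs.length = n →
    pvSlices cs ((0 :: (List.range' 1 (cs.length - 1)).filter (fun i => pvIsUp (cs.getD i ' '))) ++ [cs.length])
      = pvGo [] cs := by
  induction n using Nat.strong_induction_on with
  | _ n ih =>
    intro cs hn
    set P : Nat → Bool := fun i => pvIsUp (cs.getD i ' ') with hP
    rcases hL : (List.range' 1 (cs.length - 1)).filter P with _ | ⟨i, L'⟩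
    · -- no interior boundary: single token
      have hres : pvSlices cs ([0] ++ [cs.length]) = [String.mk cs] := by
        simp [pvSlices]
      rw [hres]
      cases cs with
      | nil => simp [pvGo]
      | cons c rest =>
          have hrest : ∀ x ∈ rest, pvIsUp x = false := by
            intro x hx
            obtain ⟨j, hj, hxj⟩ := List.mem_iff_getElem.mp hx
            have hmem : (j + 1) ∈ List.range' 1 ((c :: rest).length - 1) := by
              rw [List.mem_range'_1]; simp; omega
            have := List.filter_eq_nil_iff.mp hL _ hmem
            simp only [hP, Bool.not_eq_true] at this
            have hget : (c :: rest).getD (j + 1) ' ' = x := by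
              rw [List.getD_eq_getElem?_getD, List.getElem?_cons_succ,
                List.getElem?_eq_getElem hj]
              simp [hxj]
            rwa [hget] at this
          rw [pvGo_nil_cons, pvGo_noUp rest [c] hrest]
          rfl
    · -- first interior boundary at i
      have hpw : ((List.range' 1 (cs.length - 1)).filter P).Pairwise (· < ·) :=
        (List.pairwise_lt_range' 1 Nat.one_pos).filter P
      rw [hL] at hpw
      have hi_mem : i ∈ List.range' 1 (cs.length - 1) :=
        List.mem_of_mem_filter (hL ▸ List.mem_cons_self ..)
      have hi_rng := List.mem_range'_1.mp hi_mem
      have hi1 : 1 ≤ i := hi_rng.1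
      have hin : i < cs.length := by omega
      have hPi : P i = true := List.of_mem_filter (hL ▸ List.mem_cons_self ..)
      have hLi : ∀ x ∈ L', i < x := (List.pairwise_cons.mp hpw).1
      have hmin : ∀ j, 1 ≤ j → j < i → P j = false := by
        intro j hj1 hji
        by_contra hcon
        simp only [Bool.not_eq_false] at hcon
        have hjm : j ∈ List.range' 1 (cs.length - 1) := by rw [List.mem_range'_1]; omega
        have hjf : j ∈ (List.range' 1 (cs.length - 1)).filter P := List.mem_filter.mpr ⟨hjm, hcon⟩
        rw [hL] at hjf
        rcases List.mem_cons.mp hjf with h' | h'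
        · omega
        · have := hLi j h'; omega
      -- the boundary list of the dropped tail
      have hfilt : (List.range' 1 ((cs.drop i).length - 1)).filter
            (fun j => pvIsUp ((cs.drop i).getD j ' ')) = L'.map (fun j => j - i) := by
        have hsplit : List.range' 1 (cs.length - 1)
            = List.range' 1 (i - 1) ++ List.range' i (cs.length - i) := by
          have h := @List.range'_append 1 (i - 1) (cs.length - i) 1
          rw [show 1 + 1 * (i - 1) = i by omega,
            show (i - 1) + (cs.length - i) = cs.length - 1 by omega] at h
          exact h.symm
        have hsplit2 : List.range' i (cs.length - i) = i :: List.range' (i+1) (cs.length - i - 1) := by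
          have h' : cs.length - i = (cs.length - i - 1) + 1 := by omega
          rw [h', List.range'_succ]
          simp
        have hfilt1 : (List.range' 1 (i - 1)).filter P = [] := by
          apply List.filter_eq_nil_iff.mpr
          intro j hj
          have := List.mem_range'_1.mp hj
          simp [hmin j this.1 (by omega)]
        have hLp : L' = (List.range' (i+1) (cs.length - i - 1)).filter P := by
          have h' := hL.symm
          rw [hsplit, List.filter_append, hfilt1, hsplit2, List.filter_cons, if_pos hPi] at h'
          simpa using h'
        have hshift : List.range' (i+1) (cs.length - i - 1)
            = (List.range' 1 (cs.length - i - 1)).map (fun j => i + j) := by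
          rw [List.map_add_range']
        have hlen : (cs.drop i).length - 1 = cs.length - i - 1 := by simp
        have hQ : (List.range' 1 (cs.length - i - 1)).filter
              (fun j => pvIsUp ((cs.drop i).getD j ' '))
            = (List.range' 1 (cs.length - i - 1)).filter (fun j => P (i + j)) := by
          apply List.filter_congr
          intro j _
          simp [hP, List.getD_eq_getElem?_getD, List.getElem?_drop]
        rw [hlen, hQ, hLp, hshift, List.filter_map, List.map_map]
        have hid : ∀ l : List Nat, l.map ((fun j => j - i) ∘ (fun j => i + j)) = l := by
          intro l
          refine (List.map_congr_left ?_).trans (List.map_id _)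
          intro j _
          simp [Function.comp]
        rw [hid]
        apply List.filter_congr
        intro j _
        rfl
      -- peel the first slice and shift the rest
      have hb : (i :: L') ++ [cs.length]
          = ((0 :: L'.map (fun j => j - i)) ++ [cs.length - i]).map (fun j => j + i) := by
        simp only [List.map_append, List.map_cons, List.map_map, List.map_nil, List.cons_append]
        congr 1
        · omega
        · congr 1
          · refine ((List.map_congr_left ?_).trans (List.map_id _)).symm
            intro x hx
            have := hLi x hx
            simp only [Function.comp, id_eq]
            omega
          · have h2 : cs.length - i + i = cs.length := by omega
            rw [h2]
      have hB : pvSlices cs (0 :: (i :: L') ++ [cs.length])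
          = String.mk (cs.take i)
            :: pvSlices (cs.drop i)
              ((0 :: L'.map (fun j => j - i)) ++ [cs.length - i]) := by
        have hpeel : pvSlices cs (0 :: (i :: L') ++ [cs.length])
            = String.mk ((cs.drop 0).take (i - 0)) :: pvSlices cs ((i :: L') ++ [cs.length]) := by
          simp [pvSlices]
        rw [hpeel, hb, pvSlices_shift]
        simp
      have hlen3 : (cs.drop i).length = cs.length - i := by simp
      have hBtail := ih (cs.length - i) (by omega) (cs.drop i) hlen3
      rw [hfilt, hlen3] at hBtail
      have hgo := pvGo_split cs i hi1 hin hPi hmin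
      rw [hB, hBtail, hgo]

theorem get_elems_spec : Claim_equal_get_elems := by
  unfold Claim_equal_get_elems Spec_get_elems
  intro molecule _
  show get_elems molecule = get_elems_alt molecule
  have hA : get_elems molecule = pvGo [] molecule.toList := by
    have h := pvA_go molecule.toList [] []
    simpa [get_elems] using h
  have hB : get_elems_alt molecule
      = pvSlices molecule.toList
          ((0 :: (List.range' 1 (molecule.toList.length - 1)).filter
              (fun i => pvIsUp (molecule.toList.getD i ' '))) ++ [molecule.toList.length]) := rfl
  rw [hA, hB, pvB_eq_go molecule.toList.length molecule.toList rfl]
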